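/- GENERATED by farm/mkstatement.py from design/units.tsv (unit `memcmp`) and the Specs of Vorbis/Spec/*.lean — do not edit.
   THE STATEMENT of the proof unit `memcmp`: the function `memcmp` (38 instructions) satisfies its contract,
   given the contracts of its callees. What the names mean: Vorbis/Spec/Basic.lean. The theorem to prove:
   `theorem memcmp_ok : Vorbis.Spec.memcmp.Statement`. -/
import Vorbis.Spec.LibcMisc
namespace Vorbis.Spec.memcmp
open X86 X86.User Asan

/-- The statement of unit `memcmp`. -/
def Statement : Prop :=
  ∀ (Lay : Layout) (_hLay : Lay.hi = 0x1000000) (μ : Microarch) (_hμ : UserX.MicroOK μ) (u₀ : State)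
    (_hcode : HasCodeNat Lay u₀ Vorbis.L.memcmp.entry Vorbis.Code.code_memcmp.nat Vorbis.L.memcmp.size)
    (_h_asan_load1_noabort : Asan.SmallCheck Lay μ Vorbis.WayInv (Vorbis.CodeOK u₀) [.rax, .rdx] 1 Vorbis.L.__asan_load1_noabort.entry),
    ∀ (others : List Obj) (frames : List (Nat × FrameLayout)), Calls Lay μ Vorbis.WayInv (Vorbis.conv u₀) Vorbis.L.memcmp.entry (Vorbis.Spec.memcmp.spec others frames)

end Vorbis.Spec.memcmp
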